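-- pv_equiv track=rewrite | github.com/VichurinNik/isb | lab_1/Lab1_1/main.py | key_editing
-- ===== SOURCE A (Python) =====
-- def key_editing(key: str) -> list:
-- 	"""
-- 	Преобразование ключа в список уникальных символов.
--
-- 	:param key: строка с ключом
-- 	:return: список уникальных символов ключа в верхнем регистре
-- 	"""
-- 	seen = set()
-- 	unique_chars = []
-- 	for char in key:
-- 		if char not in seen:
-- 			seen.add(char)
-- 			unique_chars.append(char.upper())
-- 	return unique_chars
-- ===== SOURCE B (Python) =====
-- def key_editing(key: str) -> list:
--     # Recursive: emit the first character uppercased, delete all its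
--     # occurrences from the remainder, recurse on what is left.
--     if not key:
--         return []
--     first = key[0]
--     return [first.upper()] + key_editing(key[1:].replace(first, ''))
-- ===== Notes on version B (the rewrite author's own statement) =====
-- stated objective: alternative
-- what changed: Replaces the single-pass seen-set loop with structural recursion: take the first character, uppercase it, delete every later occurrence of it from the rest of the string via str.replace, and recurse on the shortened remainder; no membership set or dedup table is maintained.
import Mathlib
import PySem

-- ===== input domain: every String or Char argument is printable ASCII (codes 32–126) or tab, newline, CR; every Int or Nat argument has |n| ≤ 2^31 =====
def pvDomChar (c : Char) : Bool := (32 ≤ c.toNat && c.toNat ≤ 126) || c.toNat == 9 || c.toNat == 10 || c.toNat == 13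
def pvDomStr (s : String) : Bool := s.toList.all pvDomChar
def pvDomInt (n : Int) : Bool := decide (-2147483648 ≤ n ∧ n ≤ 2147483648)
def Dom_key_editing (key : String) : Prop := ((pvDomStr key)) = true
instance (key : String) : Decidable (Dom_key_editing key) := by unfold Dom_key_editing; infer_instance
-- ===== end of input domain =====

-- B replaces A's seen-set loop with structural recursion: emit the first char uppercased,
-- delete its later occurrences, recurse; same return value, no set maintained.

-- ===== PORT A =====
-- literal port of A: one pass, a seen-set and an output accumulator, branch on membership
def key_editing (key : String) : List String :=
  (key.toList.foldl
    (fun (st : PySem.Set Char × List String) char =>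
      if PySem.Set.contains st.1 char then st
      else (PySem.Set.add st.1 char, st.2 ++ [PySem.Str.upper (String.mk [char])]))
    (PySem.Set.empty, [])).2

-- ===== PORT B =====
-- literal port of Source B's recursion over the characters; key[1:].replace(first, '')
-- (deleting every occurrence of the single char `first`) is exactly the tail filtered
-- to the chars ≠ first, in order.
def keyEditLoop : List Char → List String
  | [] => []
  | first :: rest =>
      PySem.Str.upper (String.mk [first]) :: keyEditLoop (rest.filter (· ≠ first))
termination_by l => l.length
decreasing_by
  have h := List.length_filter_le (fun x : {x // x ∈ rest} => decide (x.1 ≠ first)) rest.attach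
  simp only [List.length_attach] at h
  simpa [List.length_unattach] using Nat.lt_succ_of_le h

def key_editing_alt (key : String) : List String := keyEditLoop key.toList

-- ===== PRECONDITION & SPEC =====
def Spec_key_editing (key : String) (out : List String) : Prop := out = key_editing_alt key
instance (key : String) (out : List String) : Decidable (Spec_key_editing key out) := by unfold Spec_key_editing; infer_instance

-- ===== CLAIM =====
def Claim_equal_key_editing : Prop := ∀ (key : String), Dom_key_editing key → Spec_key_editing key (key_editing key)

-- ===== LEMMAS AND PROOFS =====

-- folding Set.add only appends: the start set stays a prefix
theorem foldl_add_prefix (l : List Char) (s : PySem.Set Char) :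
    ∃ u, l.foldl PySem.Set.add s = s ++ u := by
  induction l generalizing s with
  | nil => exact ⟨[], by simp⟩
  | cons c t ih =>
    simp only [List.foldl_cons]
    by_cases h : c ∈ s
    · obtain ⟨u, hu⟩ := ih (PySem.Set.add s c)
      exact ⟨u, by simpa [PySem.Set.add, PySem.Set.contains, h] using hu⟩
    · obtain ⟨u, hu⟩ := ih (PySem.Set.add s c)
      exact ⟨c :: u, by simpa [PySem.Set.add, PySem.Set.contains, h] using hu⟩

-- A's loop = fold Set.add for the set, and the output is the newly-added chars, uppercased
theorem loop_invariant (l : List Char) (s : PySem.Set Char) (acc : List String) :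
    l.foldl
      (fun (st : PySem.Set Char × List String) char =>
        if PySem.Set.contains st.1 char then st
        else (PySem.Set.add st.1 char, st.2 ++ [PySem.Str.upper (String.mk [char])]))
      (s, acc)
    = (l.foldl PySem.Set.add s,
       acc ++ ((l.foldl PySem.Set.add s).drop s.length).map
         (fun c => PySem.Str.upper (String.mk [c]))) := by
  induction l generalizing s acc with
  | nil => simp
  | cons c t ih =>
    simp only [List.foldl_cons]
    by_cases h : c ∈ s
    · rw [show PySem.Set.add s c = s from by simp [PySem.Set.add, PySem.Set.contains, h]]
      simpa [PySem.Set.contains, h] using ih s acc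
    · rw [show (PySem.Set.contains s c : Bool) = false from by simp [PySem.Set.contains, h]]
      simp only [Bool.false_eq_true, if_false]
      rw [show PySem.Set.add s c = s ++ [c] from by simp [PySem.Set.add, PySem.Set.contains, h]]
      rw [ih (s ++ [c]) (acc ++ [PySem.Str.upper (String.mk [c])])]
      obtain ⟨u, hu⟩ := foldl_add_prefix t (s ++ [c])
      rw [hu]
      simp [List.drop_append]

-- elements already in the set contribute nothing to the fold
theorem foldl_add_filter (c : Char) (t : List Char) (s : PySem.Set Char) (h : c ∈ s) :
    t.foldl PySem.Set.add s = (t.filter (· ≠ c)).foldl PySem.Set.add s := by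
  induction t generalizing s with
  | nil => rfl
  | cons x u ih =>
    by_cases hx : x = c
    · subst hx
      simp only [List.foldl_cons, List.filter_cons, ne_eq, not_true_eq_false, decide_false,
        Bool.false_eq_true, if_false]
      rw [show PySem.Set.add s x = s from by simp [PySem.Set.add, PySem.Set.contains, h]]
      exact ih s h
    · have : c ∈ PySem.Set.add s x := by
        simp [PySem.Set.add, PySem.Set.contains]; split <;> simp [h]
      simpa [hx] using ih (PySem.Set.add s x) this

-- a char absent from the rest of the input can be pulled out of the fold
theorem foldl_add_cons_out (c : Char) (u : List Char) (s : List Char) (h : c ∉ u) :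
    u.foldl PySem.Set.add (c :: s) = c :: u.foldl PySem.Set.add s := by
  induction u generalizing s with
  | nil => rfl
  | cons x t ih =>
    have hx : x ≠ c := fun e => h (e ▸ List.mem_cons_self ..)
    have hc : c ∉ t := fun e => h (List.mem_cons_of_mem _ e)
    have : PySem.Set.add (c :: s) x = c :: PySem.Set.add s x := by
      simp [PySem.Set.add, PySem.Set.contains, hx]
      split <;> simp
    simpa [this] using ih (PySem.Set.add s x) hc

-- B's recursion computes the first-occurrence dedup (as PySem.Set.ofList), uppercased
theorem keyEditLoop_eq : ∀ l : List Char,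
    keyEditLoop l = (PySem.Set.ofList l).map (fun c => PySem.Str.upper (String.mk [c]))
  | [] => by rw [keyEditLoop.eq_def]; rfl
  | c :: t => by
    rw [keyEditLoop.eq_def]
    simp only []
    rw [keyEditLoop_eq (t.filter (· ≠ c))]
    have h1 : PySem.Set.ofList (c :: t) = c :: PySem.Set.ofList (t.filter (· ≠ c)) := by
      rw [PySem.Set.ofList_eq_foldl, PySem.Set.ofList_eq_foldl]
      simp only [List.foldl_cons]
      rw [show PySem.Set.add [] c = [c] from rfl,
          foldl_add_filter c t [c] (List.mem_singleton.2 rfl),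
          foldl_add_cons_out c _ [] (by simp)]
    rw [h1]; rfl
termination_by l => l.length
decreasing_by exact Nat.lt_succ_of_le (List.length_filter_le _ _)

-- ===== VERDICT =====
theorem key_editing_spec : Claim_equal_key_editing := by
  intro key _
  unfold Spec_key_editing key_editing key_editing_alt
  rw [loop_invariant, keyEditLoop_eq]
  simp [PySem.Set.empty, PySem.Set.ofList_eq_foldl]
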